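-- pv_equiv track=rewrite | github.com/JHONATAN9A/Prime-Time | FormEuler.py | formula_euler
-- ===== SOURCE A (Python) =====
-- def num_primo(numero):
--     for n in range(2, numero):
--         if numero % n == 0:
--             return False
--     return True
--
-- def  formula_euler(inicio,final):
--     Lista_primos= []
--     for numero in range (inicio,final):
--         formula = (numero**2) + numero + 41
--         if num_primo(formula) == True:
--             Lista_primos.append(formula)
--     cantidad_primos = len(Lista_primos)
--     return cantidad_primos
-- ===== SOURCE B (Python) =====
-- def es_primo(v):
--     if v < 2:
--         return False
--     d = 2
--     while d * d <= v:
--         if v % d == 0: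
--             return False
--         d += 1
--     return True
--
-- def formula_euler(inicio, final):
--     cantidad = 0
--     for numero in range(inicio, final):
--         if es_primo(numero * (numero + 1) + 41):
--             cantidad += 1
--     return cantidad
-- ===== Notes on version B (the rewrite author's own statement) =====
-- stated objective: alternative
-- what changed: Replaces per-value trial division over the whole range(2, v) by a divisor search bounded at sqrt(v) (while d*d <= v), and counts matches with an accumulator instead of building a list and taking its length.
import Mathlib
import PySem

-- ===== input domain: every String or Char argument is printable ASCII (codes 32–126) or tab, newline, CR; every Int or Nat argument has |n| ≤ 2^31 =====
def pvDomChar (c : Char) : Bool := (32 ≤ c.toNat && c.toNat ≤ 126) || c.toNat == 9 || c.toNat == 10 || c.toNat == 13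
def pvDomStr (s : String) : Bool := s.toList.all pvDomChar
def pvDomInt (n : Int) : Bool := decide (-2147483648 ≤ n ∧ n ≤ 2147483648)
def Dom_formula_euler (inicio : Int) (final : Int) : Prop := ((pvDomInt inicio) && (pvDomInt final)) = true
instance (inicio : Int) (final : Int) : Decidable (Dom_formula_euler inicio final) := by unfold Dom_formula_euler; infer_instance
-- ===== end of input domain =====

-- B bounds the divisor search at sqrt(v) (while d*d <= v) instead of scanning all of range(2, v),
-- and counts matches directly instead of building a list and taking its length (objective: alternative).

-- ===== PORT A =====
-- the early-return loop of num_primo, step for step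
def numPrimoLoop (numero : Int) : List Int → Bool
  | [] => true
  | n :: rest => if PySem.Int.mod numero n == 0 then false else numPrimoLoop numero rest

def num_primo (numero : Int) : Bool := numPrimoLoop numero (PySem.List.pyRange 2 numero 1)

def formula_euler (inicio : Int) (final : Int) : Int :=
  let lista_primos := (PySem.List.pyRange inicio final 1).foldl
    (fun acc numero =>
      let formula := numero ^ 2 + numero + 41
      if num_primo formula == true then acc ++ [formula] else acc) []
  (lista_primos.length : Int)

-- ===== PORT B =====
-- Source B's while loop: d runs from 2 while d*d <= v
def esPrimoLoop (v : Int) (d : Int) : Bool :=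
  if h : d * d ≤ v then
    if PySem.Int.mod v d == 0 then false else esPrimoLoop v (d + 1)
  else true
termination_by (v + 1 - d).toNat
decreasing_by
  have hdd : d ≤ d * d := by
    rcases le_total d 0 with h0 | h0
    · nlinarith
    · nlinarith
  omega

def es_primo (v : Int) : Bool := if v < 2 then false else esPrimoLoop v 2

def formula_euler_alt (inicio : Int) (final : Int) : Int :=
  (PySem.List.pyRange inicio final 1).foldl
    (fun cantidad numero =>
      if es_primo (numero * (numero + 1) + 41) then cantidad + 1 else cantidad) 0

-- ===== PRECONDITION & SPEC =====
def Spec_formula_euler (inicio : Int) (final : Int) (out : Int) : Prop := out = formula_euler_alt inicio final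
instance (inicio : Int) (final : Int) (out : Int) : Decidable (Spec_formula_euler inicio final out) := by unfold Spec_formula_euler; infer_instance

-- ===== CLAIM (what is proved, stated in full; the proofs are below) =====
def Claim_equal_formula_euler : Prop := ∀ (inicio : Int) (final : Int), Dom_formula_euler inicio final → Spec_formula_euler inicio final (formula_euler inicio final)

-- ===== LEMMAS AND PROOFS =====

lemma numPrimoLoop_eq_true (numero : Int) (L : List Int) :
    numPrimoLoop numero L = true ↔ ∀ n ∈ L, ¬ (PySem.Int.mod numero n = 0) := by
  induction L with
  | nil => simp [numPrimoLoop]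
  | cons n rest ih =>
    by_cases h : PySem.Int.mod numero n = 0
    · simp [numPrimoLoop, h]
    · simp [numPrimoLoop, h, ih]

lemma esPrimoLoop_eq_true (v d : Int) (hd : 0 < d) :
    esPrimoLoop v d = true ↔ ∀ e, d ≤ e → e * e ≤ v → ¬ (PySem.Int.mod v e = 0) := by
  rw [esPrimoLoop]
  by_cases h : d * d ≤ v
  · simp only [h, dif_pos]
    by_cases hm : PySem.Int.mod v d = 0
    · simp only [hm, beq_self_eq_true, if_pos]
      constructor
      · intro hfalse; exact absurd hfalse (by simp)
      · intro hall; exact absurd (hall d le_rfl h hm) (fun c => c)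
    · have hbeq : (PySem.Int.mod v d == 0) = false := by simp [hm]
      rw [hbeq]
      simp only [Bool.false_eq_true, if_false]
      rw [esPrimoLoop_eq_true v (d + 1) (by omega)]
      constructor
      · intro hall e he hev
        rcases eq_or_lt_of_le he with rfl | hlt
        · exact hm
        · exact hall e (by omega) hev
      · intro hall e he hev
        exact hall e (by omega) hev
  · simp only [h, dif_neg, not_false_iff, true_iff]
    intro e he hev
    exfalso
    have : d * d ≤ e * e := by nlinarith
    omega
termination_by (v + 1 - d).toNat
decreasing_by
  have hdd : d ≤ d * d := by nlinarith
  omega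

-- for v ≥ 2, "no divisor in [2, v)" ↔ "no divisor d with d*d ≤ v"
lemma primo_eq (v : Int) (hv : 2 ≤ v) : num_primo v = es_primo v := by
  have hA : num_primo v = true ↔ ∀ n, 2 ≤ n → n < v → ¬ (PySem.Int.mod v n = 0) := by
    rw [num_primo, numPrimoLoop_eq_true]
    constructor
    · intro hall n h1 h2
      exact hall n (PySem.List.mem_pyRange_one.mpr ⟨h1, h2⟩)
    · intro hall n hn
      obtain ⟨h1, h2⟩ := PySem.List.mem_pyRange_one.mp hn
      exact hall n h1 h2
  have hB : es_primo v = true ↔ ∀ e, 2 ≤ e → e * e ≤ v → ¬ (PySem.Int.mod v e = 0) := by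
    rw [es_primo, if_neg (by omega)]
    exact esPrimoLoop_eq_true v 2 (by omega)
  have hiff : (∀ n, 2 ≤ n → n < v → ¬ (PySem.Int.mod v n = 0))
      ↔ ∀ e, 2 ≤ e → e * e ≤ v → ¬ (PySem.Int.mod v e = 0) := by
    constructor
    · intro hall e h2 hev
      exact hall e h2 (by nlinarith)
    · intro hall n h2 hlt hm
      have hdvd : n ∣ v := (PySem.Int.mod_eq_zero_iff_dvd v n).mp hm
      obtain ⟨m, hm'⟩ := hdvd
      have hm2 : 2 ≤ m := by nlinarith
      by_cases hnn : n * n ≤ v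
      · exact hall n h2 hnn hm
      · have hmn : m < n := by nlinarith
        have hmm : m * m ≤ v := by nlinarith
        have : PySem.Int.mod v m = 0 := by
          rw [PySem.Int.mod_eq_zero_iff_dvd]
          exact ⟨n, by linarith [hm']⟩
        exact hall m hm2 hmm this
  rw [Bool.eq_iff_iff, hA, hB]
  exact hiff

lemma formula_pointwise (x : Int) :
    ((num_primo (x ^ 2 + x + 41) == true) = es_primo (x * (x + 1) + 41)) := by
  have hv : x ^ 2 + x + 41 = x * (x + 1) + 41 := by ring
  have hge : 2 ≤ x * (x + 1) + 41 := by nlinarith [mul_self_nonneg (2 * x + 1)]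
  rw [hv, primo_eq _ hge]
  simp

-- ===== VERDICT (by name: the statement is the Claim_ definition above) =====
theorem formula_euler_spec : Claim_equal_formula_euler := by
  intro inicio final _
  unfold Spec_formula_euler formula_euler formula_euler_alt
  rw [PySem.List.foldl_append_if, PySem.List.foldl_if_add_one]
  simp only [List.nil_append, List.length_map, zero_add, List.countP_eq_length_filter]
  rw [List.filter_congr (fun x _ => formula_pointwise x)]
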